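-- pv_equiv track=rewrite | github.com/Tinkerbug-Robotics/TinkerRocket | Data_Analysis/analyze_gaps_post_fix.py | _build_crc16_table
-- ===== SOURCE A (Python) =====
-- def _build_crc16_table(poly=0x8001):
--     table = []
--     for i in range(256):
--         crc = i << 8
--         for _ in range(8):
--             if crc & 0x8000:
--                 crc = (crc << 1) ^ poly
--             else:
--                 crc = crc << 1
--             crc &= 0xFFFF
--         table.append(crc)
--     return table
-- ===== SOURCE B (Python) =====
-- def _build_crc16_table(poly=0x8001):
--     # CRC step is GF(2)-linear in crc: compute an 8-entry basis (the CRC of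
--     # each single-bit index), then every table entry is the XOR of the basis
--     # entries for the bits set in i.
--     basis = []
--     for b in range(8):
--         crc = (1 << b) << 8
--         for _ in range(8):
--             crc = ((crc << 1) ^ (poly if crc & 0x8000 else 0)) & 0xFFFF
--         basis.append(crc)
--     table = []
--     for i in range(256):
--         v = 0
--         for b in range(8):
--             if (i >> b) & 1:
--                 v ^= basis[b]
--         table.append(v)
--     return table
-- ===== Notes on version B (the rewrite author's own statement) =====
-- stated objective: alternative
-- what changed: Exploits GF(2)-linearity of the CRC step: first computes a small basis (the CRC of each single-bit index) with the shift/XOR/mask loop, then builds the table by XOR-accumulating basis entries over the set bits of each index, instead of running the per-entry shift loop for every index.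
import Mathlib
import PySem

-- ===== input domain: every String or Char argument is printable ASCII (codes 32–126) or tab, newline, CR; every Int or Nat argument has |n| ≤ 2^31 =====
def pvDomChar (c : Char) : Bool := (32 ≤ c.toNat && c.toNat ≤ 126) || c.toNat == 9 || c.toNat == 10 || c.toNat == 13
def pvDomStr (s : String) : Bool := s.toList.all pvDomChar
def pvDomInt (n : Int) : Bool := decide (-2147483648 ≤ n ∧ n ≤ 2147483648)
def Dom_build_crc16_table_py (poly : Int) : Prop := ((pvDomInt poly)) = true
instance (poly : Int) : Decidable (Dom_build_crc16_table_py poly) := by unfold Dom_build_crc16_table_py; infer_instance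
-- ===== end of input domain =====

-- ===== PORT A =====
-- port of _build_crc16_table: 256 iterations, each running the 8-step shift/XOR/mask loop
def build_crc16_table_py (poly : Int) : List Int :=
  (PySem.List.pyRange 0 256 1).foldl
    (fun (table : List Int) (i : Int) =>
      table ++
        [(PySem.List.pyRange 0 8 1).foldl
          (fun crc _ =>
            let crc := if PySem.Int.band crc 32768 ≠ 0 then PySem.Int.bxor (crc <<< (1:Nat)) poly
                       else crc <<< (1:Nat)
            PySem.Int.band crc 65535)
          (i <<< (8:Nat))]) []

-- ===== PORT B =====
-- port of B: 8-entry basis via the shift/XOR/mask loop, then XOR-accumulation over set bits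
def build_crc16_table_py_alt (poly : Int) : List Int :=
  let basis := (PySem.List.pyRange 0 8 1).foldl
    (fun (basis : List Int) (b : Int) =>
      basis ++
        [(PySem.List.pyRange 0 8 1).foldl
          (fun crc _ =>
            PySem.Int.band
              (PySem.Int.bxor (crc <<< (1:Nat))
                (if PySem.Int.band crc 32768 ≠ 0 then poly else 0)) 65535)
          (((1:Int) <<< b.toNat) <<< (8:Nat))]) []
  (PySem.List.pyRange 0 256 1).foldl
    (fun (table : List Int) (i : Int) =>
      table ++
        [(PySem.List.pyRange 0 8 1).foldl
          (fun v b =>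
            if PySem.Int.band (i >>> b.toNat) 1 ≠ 0 then
              PySem.Int.bxor v (PySem.List.pyGetD basis b 0)
            else v) 0]) []

-- ===== PRECONDITION & SPEC =====
def Spec_build_crc16_table_py (poly : Int) (out : List Int) : Prop := out = build_crc16_table_py_alt poly
instance (poly : Int) (out : List Int) : Decidable (Spec_build_crc16_table_py poly out) := by unfold Spec_build_crc16_table_py; infer_instance

-- ===== CLAIM (what is proved, stated in full; the proofs are below) =====
def Claim_equal_build_crc16_table_py : Prop := ∀ (poly : Int), Dom_build_crc16_table_py poly → Spec_build_crc16_table_py poly (build_crc16_table_py poly)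

-- ===== LEMMAS AND PROOFS =====

-- the low 16 bits of poly, as a Nat
def pvQ (p : Int) : Nat := (PySem.Int.band p 65535).toNat
-- one CRC step on the Int side (the loop body both ports share) and on the Nat side
def pvStepI (p : Int) (c : Int) : Int :=
  PySem.Int.band (if PySem.Int.band c 32768 ≠ 0 then PySem.Int.bxor (c <<< (1:Nat)) p
                  else c <<< (1:Nat)) 65535
def pvStepN (q : Nat) (c : Nat) : Nat :=
  (if c &&& 32768 ≠ 0 then (c <<< 1) ^^^ q else c <<< 1) &&& 65535
-- 8 iterations, CRC of one table index on the Nat side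
def pvIterN (q : Nat) (c : Nat) : Nat :=
  (PySem.List.pyRange 0 8 1).foldl (fun c _ => pvStepN q c) c
def pvEntry (q : Nat) (n : Nat) : Nat := pvIterN q (n <<< 8)

theorem pv_xor_allones : ∀ (n : Nat) (y : Nat), y < 2^n → (2^n - 1) ^^^ y = (2^n - 1) - y := by
  intro n
  induction n with
  | zero => intro y hy; interval_cases y; decide
  | succ n ih =>
    intro y hy
    have h2 : y / 2 < 2 ^ n := by omega
    have hdiv : ((2^(n+1) - 1) ^^^ y) / 2 = (2^n - 1) ^^^ (y / 2) := by
      rw [Nat.xor_div_two]; congr 1; omega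
    have hmod : ((2^(n+1) - 1) ^^^ y) % 2 = ((2^(n+1) - 1) + y) % 2 := Nat.xor_mod_two_eq
    have := ih (y / 2) h2
    have hp : 0 < 2^n := Nat.two_pow_pos n
    omega

theorem pv_xor_two_pow_add : ∀ (k : Nat) (a : Nat), a < 2^k → 2^k ^^^ a = 2^k + a := by
  intro k
  induction k with
  | zero => intro a ha; interval_cases a; decide
  | succ k ih =>
    intro a ha
    have h2 : a / 2 < 2 ^ k := by omega
    have hdiv : (2^(k+1) ^^^ a) / 2 = 2^k ^^^ (a / 2) := by
      rw [Nat.xor_div_two]; congr 1; omega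
    have hmod : (2^(k+1) ^^^ a) % 2 = (2^(k+1) + a) % 2 := Nat.xor_mod_two_eq
    have := ih (a / 2) h2
    have hp : 0 < 2^k := Nat.two_pow_pos k
    omega

theorem pv_testBit_65535 (i : Nat) : Nat.testBit 65535 i = decide (i < 16) := by
  rw [show (65535:Nat) = 2^16-1 by norm_num]
  exact Nat.testBit_two_pow_sub_one 16 i

-- masking the XOR argument first does not change the masked XOR
theorem pv_mask_xor (a b : Nat) : (a ^^^ b) &&& 65535 = (a ^^^ (b &&& 65535)) &&& 65535 := by
  apply Nat.eq_of_testBit_eq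
  intro i
  simp only [Nat.testBit_and, Nat.testBit_xor, pv_testBit_65535]
  cases a.testBit i <;> cases b.testBit i <;> cases (decide (i < 16)) <;> rfl

-- the crux: Python (m ^ poly) & 0xFFFF equals the Nat-side XOR with poly's low 16 bits
theorem pv_band_bxor_mask (p : Int) (m : Nat) :
    PySem.Int.band (PySem.Int.bxor (m:Int) p) 65535 = (((m ^^^ pvQ p) &&& 65535 : Nat) : Int) := by
  rcases le_or_gt 0 p with hp | hp
  · have h1 : PySem.Int.bxor (m:Int) p = ((m ^^^ p.toNat : Nat) : Int) := by
      simp [PySem.Int.bxor, hp]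
    have h2 : pvQ p = p.toNat &&& 65535 := by
      simp [pvQ, PySem.Int.band, hp]
    rw [h1, h2, show ((65535:Int)) = ((65535:Nat):Int) by rfl, PySem.Int.band_natCast]
    rw [pv_mask_xor]
  · -- negative poly: unfold the two's-complement branches of bxor/band
    set r : Nat := (-p - 1).toNat with hr
    have h1 : PySem.Int.bxor (m:Int) p = -((m ^^^ r : Nat) : Int) - 1 := by
      simp [PySem.Int.bxor, not_le.mpr hp, hr]
    have h2 : PySem.Int.band (PySem.Int.bxor (m:Int) p) 65535
        = ((65535 - (65535 &&& (m ^^^ r)) : Nat) : Int) := by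
      rw [h1]
      simp [PySem.Int.band]
      omega
    have h3 : pvQ p = 65535 - (65535 &&& r) := by
      simp [pvQ, PySem.Int.band, not_le.mpr hp, hr]
    rw [h2, h3]
    congr 1
    -- rewrite both subtractions as XORs with the all-ones mask, then compare bitwise
    have e1 : (65535:Nat) - (65535 &&& (m ^^^ r)) = 65535 ^^^ (65535 &&& (m ^^^ r)) := by
      rw [show (65535:Nat) = 2^16-1 by norm_num]
      rw [pv_xor_allones 16 _ (by have := Nat.and_le_left (n := 2^16-1) (m := m ^^^ r); omega)]
    have e2 : (65535:Nat) - (65535 &&& r) = 65535 ^^^ (65535 &&& r) := by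
      rw [show (65535:Nat) = 2^16-1 by norm_num]
      rw [pv_xor_allones 16 _ (by have := Nat.and_le_left (n := 2^16-1) (m := r); omega)]
    rw [e1, e2]
    apply Nat.eq_of_testBit_eq
    intro i
    simp only [Nat.testBit_and, Nat.testBit_xor, pv_testBit_65535]
    cases m.testBit i <;> cases r.testBit i <;> cases (decide (i < 16)) <;> rfl

-- B writes the step as one expression: ((crc << 1) ^ (poly if bit15 else 0)) & 0xFFFF
def pvStepB (p : Int) (c : Int) : Int :=
  PySem.Int.band (PySem.Int.bxor (c <<< (1:Nat)) (if PySem.Int.band c 32768 ≠ 0 then p else 0)) 65535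

theorem pv_stepB_eq (p : Int) (c : Int) : pvStepB p c = pvStepI p c := by
  unfold pvStepB pvStepI
  by_cases h : PySem.Int.band c 32768 ≠ 0
  · rw [if_pos h, if_pos h]
  · rw [if_neg h, if_neg h, PySem.Int.bxor_zero]

theorem pv_step_cast (p : Int) (c : Nat) : pvStepI p (c:Int) = ((pvStepN (pvQ p) c : Nat) : Int) := by
  have hcond : PySem.Int.band (c:Int) 32768 = ((c &&& 32768 : Nat) : Int) := by simp [pysem]
  have hsh : ((c:Int) <<< (1:Nat)) = ((c <<< 1 : Nat) : Int) := by simp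
  unfold pvStepI pvStepN
  rw [hcond, hsh]
  by_cases h : c &&& 32768 = 0
  · rw [if_neg (by simp [h]), if_neg (by simp [h])]
    rw [show ((65535:Int)) = ((65535:Nat):Int) from rfl, PySem.Int.band_natCast]
  · rw [if_pos (by simpa using h), if_pos h]
    exact pv_band_bxor_mask p (c <<< 1)

theorem pv_fold_cast (p : Int) (l : List Int) (c : Nat) :
    l.foldl (fun c _ => pvStepI p c) (c:Int) = ((l.foldl (fun c _ => pvStepN (pvQ p) c) c : Nat) : Int) := by
  induction l generalizing c with
  | nil => rfl
  | cons x xs ih => simp only [List.foldl_cons, pv_step_cast, ih]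

theorem pv_stepN_zero (q : Nat) : pvStepN q 0 = 0 := by
  simp [pvStepN]

-- the loop condition reads bit 15
theorem pv_cond_testBit (x : Nat) : (x &&& 32768 ≠ 0) ↔ x.testBit 15 := by
  rw [show (32768:Nat) = 2^15 by norm_num, Nat.and_two_pow]
  cases h : x.testBit 15
  · simp
  · simp

theorem pv_stepN_eq (q c : Nat) :
    pvStepN q c = ((c <<< 1) ^^^ (if c.testBit 15 then q else 0)) &&& 65535 := by
  unfold pvStepN
  by_cases h : c.testBit 15
  · rw [if_pos ((pv_cond_testBit c).mpr h), if_pos h]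
  · rw [if_neg (fun hc => h ((pv_cond_testBit c).mp hc)), if_neg h, Nat.xor_zero]

-- one CRC step is GF(2)-linear
theorem pv_stepN_xor (q a b : Nat) : pvStepN q (a ^^^ b) = pvStepN q a ^^^ pvStepN q b := by
  simp only [pv_stepN_eq]
  by_cases ha : a.testBit 15 <;> by_cases hb : b.testBit 15 <;>
    simp [Nat.testBit_xor, ha, hb] <;>
    (apply Nat.eq_of_testBit_eq; intro i;
     simp only [Nat.testBit_and, Nat.testBit_xor, Nat.testBit_shiftLeft, pv_testBit_65535];
     cases a.testBit (i-1) <;> cases b.testBit (i-1) <;> cases q.testBit i <;>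
       cases (decide (1 ≤ i)) <;> cases (decide (i < 16)) <;> rfl)

theorem pv_foldl_stepN_zero (q : Nat) (l : List Int) :
    l.foldl (fun c _ => pvStepN q c) 0 = 0 := by
  induction l with
  | nil => rfl
  | cons x xs ih => simpa [pv_stepN_zero] using ih

theorem pv_foldl_stepN_xor (q : Nat) (l : List Int) : ∀ (a b : Nat),
    l.foldl (fun c _ => pvStepN q c) (a ^^^ b)
      = l.foldl (fun c _ => pvStepN q c) a ^^^ l.foldl (fun c _ => pvStepN q c) b := by
  induction l with
  | nil => intro a b; rfl
  | cons x xs ih =>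
    intro a b
    simp only [List.foldl_cons, pv_stepN_xor]
    exact ih _ _

theorem pv_iterN_zero (q : Nat) : pvIterN q 0 = 0 := by
  simpa [pvIterN] using pv_foldl_stepN_zero q (PySem.List.pyRange 0 8 1)

theorem pv_iterN_xor (q a b : Nat) : pvIterN q (a ^^^ b) = pvIterN q a ^^^ pvIterN q b := by
  simpa [pvIterN] using pv_foldl_stepN_xor q (PySem.List.pyRange 0 8 1) a b

theorem pv_entry_zero (q : Nat) : pvEntry q 0 = 0 := by
  simpa [pvEntry] using pv_iterN_zero q

theorem pv_entry_xor (q a b : Nat) : pvEntry q (a ^^^ b) = pvEntry q a ^^^ pvEntry q b := by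
  simp only [pvEntry, Nat.shiftLeft_xor_distrib, pv_iterN_xor]

-- B's bit loop accumulates exactly the CRC of n % 2^k
theorem pv_bits_fold (q : Nat) : ∀ (k : Nat) (n : Nat),
    (List.range k).foldl (fun v b => if n.testBit b then v ^^^ pvEntry q (2^b) else v) 0
      = pvEntry q (n % 2^k) := by
  intro k
  induction k with
  | zero =>
    intro n
    simp [List.range_zero, Nat.mod_one, pv_entry_zero]
  | succ k ih =>
    intro n
    rw [List.range_succ, List.foldl_append, ih n]
    have hbit : n.testBit k = decide (n / 2^k % 2 = 1) := Nat.testBit_eq_decide_div_mod_eq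
    have hmod : n % 2^k < 2^k := Nat.mod_lt n (Nat.two_pow_pos k)
    by_cases h : n.testBit k
    · have h1 : n / 2^k % 2 = 1 := by
        rw [hbit] at h; simpa using h
      have hsplit : n % 2^(k+1) = n % 2^k + 2^k := by
        rw [pow_succ, Nat.mod_mul, h1]; omega
      have hx : n % 2^(k+1) = (n % 2^k) ^^^ 2^k := by
        rw [Nat.xor_comm, pv_xor_two_pow_add k _ hmod]; omega
      simp only [List.foldl_cons, List.foldl_nil, h, if_true]
      rw [hx, pv_entry_xor]
    · have h1 : n / 2^k % 2 = 0 := by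
        rw [hbit] at h; simp at h; omega
      have hsplit : n % 2^(k+1) = n % 2^k := by
        rw [pow_succ, Nat.mod_mul, h1]; omega
      simp [h, hsplit]

-- Int-side XOR-accumulation over bits equals the Nat-side one
theorem pv_bitfold_cast (n : Nat) (h : Nat → Nat) : ∀ (l : List Nat) (v : Nat),
    l.foldl (fun v k => if n.testBit k then PySem.Int.bxor v ((h k : Nat) : Int) else v) ((v:Nat) : Int)
      = ((l.foldl (fun v k => if n.testBit k then v ^^^ h k else v) v : Nat) : Int) := by
  intro l
  induction l with
  | nil => intro v; rfl
  | cons x xs ih =>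
    intro v
    simp only [List.foldl_cons]
    by_cases hx : n.testBit x
    · rw [if_pos hx, if_pos hx, show PySem.Int.bxor ((v:Nat):Int) ((h x : Nat):Int) = ((v ^^^ h x : Nat) : Int) by simp [pysem]]
      exact ih _
    · rw [if_neg hx, if_neg hx]
      exact ih _

theorem pv_range8 : PySem.List.pyRange 0 8 1 = (List.range 8).map (fun (k : Nat) => (k : Int)) := by
  rw [PySem.List.pyRange_one]
  norm_num
  rfl

theorem pv_one_shift (k : Nat) : (1:Int) <<< k <<< (8:Nat) = (((2^k <<< 8 : Nat)) : Int) := by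
  rw [show (1:Int) = ((1:Nat):Int) from rfl]
  rw [show (((1:Nat):Int) <<< k) = (((1 <<< k : Nat)):Int) by simp]
  rw [show ((((1:Nat) <<< k : Nat)):Int) <<< (8:Nat) = ((((1:Nat) <<< k) <<< 8 : Nat) : Int) by simp]
  norm_num [Nat.shiftLeft_eq]

-- ===== VERDICT (by name: the statement is the Claim_ definition above) =====
set_option maxHeartbeats 1000000 in
theorem build_crc16_table_py_spec : Claim_equal_build_crc16_table_py := by
  intro p _
  show build_crc16_table_py p = build_crc16_table_py_alt p
  have hA : build_crc16_table_py p
      = (PySem.List.pyRange 0 256 1).map (fun (i : Int) =>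
          (PySem.List.pyRange 0 8 1).foldl (fun c _ => pvStepI p c) (i <<< (8:Nat))) := by
    show (PySem.List.pyRange 0 256 1).foldl
        (fun (table : List Int) (i : Int) => table ++
          [(PySem.List.pyRange 0 8 1).foldl (fun c _ => pvStepI p c) (i <<< (8:Nat))]) [] = _
    rw [PySem.List.foldl_append_singleton_eq_map]
    rfl
  have hB : build_crc16_table_py_alt p
      = (PySem.List.pyRange 0 256 1).map (fun (i : Int) =>
          (PySem.List.pyRange 0 8 1).foldl
            (fun v b =>
              if PySem.Int.band (i >>> b.toNat) 1 ≠ 0 then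
                PySem.Int.bxor v (PySem.List.pyGetD
                  ((PySem.List.pyRange 0 8 1).map (fun (b : Int) =>
                    (PySem.List.pyRange 0 8 1).foldl (fun c _ => pvStepI p c)
                      (((1:Int) <<< b.toNat) <<< (8:Nat)))) b 0)
              else v) 0) := by
    have hstep : (fun (c : Int) (_ : Int) => pvStepB p c) = (fun (c : Int) (_ : Int) => pvStepI p c) :=
      funext fun c => funext fun _ => pv_stepB_eq p c
    have hbasis : (PySem.List.pyRange 0 8 1).foldl
        (fun (basis : List Int) (b : Int) => basis ++
          [(PySem.List.pyRange 0 8 1).foldl (fun c _ => pvStepB p c)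
            (((1:Int) <<< b.toNat) <<< (8:Nat))]) []
        = (PySem.List.pyRange 0 8 1).map (fun (b : Int) =>
            (PySem.List.pyRange 0 8 1).foldl (fun c _ => pvStepI p c)
              (((1:Int) <<< b.toNat) <<< (8:Nat))) := by
      rw [hstep, PySem.List.foldl_append_singleton_eq_map]
      rfl
    show (PySem.List.pyRange 0 256 1).foldl
        (fun (table : List Int) (i : Int) => table ++
          [(PySem.List.pyRange 0 8 1).foldl
            (fun v b =>
              if PySem.Int.band (i >>> b.toNat) 1 ≠ 0 then
                PySem.Int.bxor v (PySem.List.pyGetD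
                  ((PySem.List.pyRange 0 8 1).foldl
                    (fun (basis : List Int) (b : Int) => basis ++
                      [(PySem.List.pyRange 0 8 1).foldl (fun c _ => pvStepB p c)
                        (((1:Int) <<< b.toNat) <<< (8:Nat))]) []) b 0)
              else v) 0]) [] = _
    rw [hbasis, PySem.List.foldl_append_singleton_eq_map]
    rfl
  rw [hA, hB]
  apply List.map_congr_left
  intro i hi
  obtain ⟨h0, h256⟩ := (PySem.List.mem_pyRange_one).mp hi
  obtain ⟨n, rfl⟩ : ∃ n : Nat, i = (n : Int) := ⟨i.toNat, (Int.toNat_of_nonneg h0).symm⟩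
  have hn : n < 256 := by exact_mod_cast h256
  -- A side
  have hAn : (PySem.List.pyRange 0 8 1).foldl (fun c _ => pvStepI p c) ((n:Int) <<< (8:Nat))
      = ((pvEntry (pvQ p) n : Nat) : Int) := by
    rw [show ((n:Int) <<< (8:Nat)) = ((n <<< 8 : Nat) : Int) by simp]
    exact pv_fold_cast p _ _
  rw [hAn]
  -- B side: rewrite the bit loop into the Nat-side fold and use linearity
  have hBID : ∀ (v : Int), ∀ k ∈ List.range 8,
      (fun (v : Int) (b : Int) =>
        if PySem.Int.band ((n:Int) >>> b.toNat) 1 ≠ 0 then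
          PySem.Int.bxor v (PySem.List.pyGetD
            ((PySem.List.pyRange 0 8 1).map (fun (b : Int) =>
              (PySem.List.pyRange 0 8 1).foldl (fun c _ => pvStepI p c)
                (((1:Int) <<< b.toNat) <<< (8:Nat)))) b 0)
        else v) v (k : Int)
      = (fun (v : Int) (k : Nat) =>
          if n.testBit k then PySem.Int.bxor v ((pvEntry (pvQ p) (2^k) : Nat) : Int) else v) v k := by
    intro v k hk
    have hk8 : k < 8 := List.mem_range.mp hk
    have hcond : (PySem.Int.band ((n:Int) >>> ((k:Int)).toNat) 1 ≠ 0) ↔ n.testBit k := by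
      rw [Int.toNat_natCast, show ((n:Int) >>> k) = ((n >>> k : Nat) : Int) by simp,
        show ((1:Int)) = ((1:Nat):Int) from rfl, PySem.Int.band_natCast]
      rw [Int.natCast_ne_zero]
      simp [Nat.testBit, Nat.and_one_is_mod, Nat.shiftRight_eq_div_pow]
    have hget : PySem.List.pyGetD
        ((PySem.List.pyRange 0 8 1).map (fun (b : Int) =>
          (PySem.List.pyRange 0 8 1).foldl (fun c _ => pvStepI p c)
            (((1:Int) <<< b.toNat) <<< (8:Nat)))) ((k:Nat):Int) 0
        = ((pvEntry (pvQ p) (2^k) : Nat) : Int) := by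
      rw [PySem.List.pyGetD_map_pyRange_of_nonneg _ 8 (k:Int) 0 (by positivity) (by exact_mod_cast hk8)]
      simp only [Int.toNat_natCast]
      rw [pv_one_shift k]
      exact pv_fold_cast p _ _
    by_cases hb : n.testBit k
    · simp only [hget, if_pos (hcond.mpr hb), if_pos hb]
    · simp only [if_neg (fun hc => hb (hcond.mp hc)), if_neg hb]
  rw [pv_range8, List.foldl_map]
  refine Eq.symm ((PySem.List.foldl_congr_mem _ _ _ _ hBID).trans ?_)
  rw [show (0:Int) = (((0:Nat)):Int) from rfl, pv_bitfold_cast n (fun k => pvEntry (pvQ p) (2^k))]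
  rw [pv_bits_fold (pvQ p) 8 n]
  rw [Nat.mod_eq_of_lt (by norm_num; omega : n < 2^8)]
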